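-- pv_equiv track=rewrite | github.com/frikubo/cryptography | vigener/helpers.py | findPossibleKeyLengths
-- ===== SOURCE A (Python) =====
-- def findPossibleKeyLengths(data, r):
--     res = [int] * len(data)
--     for d in range(len(data)):
--         max = -1
--         k = 0
--         #20 - 29
--         for i in range(r[0], r[1] + 1):
--             c = 0
--             for t in data[d] :
--                 if int(t[0]) % i == 0 :
--                     c += 1
--
--             if c > max:
--                 max = c
--                 k = i
--         res[d] = k
--
--     return res
-- ===== SOURCE B (Python) =====
-- def findPossibleKeyLengths(data, r):
--     lengths = list(range(r[0], r[1] + 1))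
--     if not lengths:
--         return [0] * len(data)
--     res = []
--     for d in data:
--         freq = {}
--         for t in d:
--             v = int(t[0])
--             freq[v] = freq.get(v, 0) + 1
--         counts = [sum(n for v, n in freq.items() if v % i == 0) for i in lengths]
--         res.append(lengths[counts.index(max(counts))])
--     return res
-- ===== Notes on version B (the rewrite author's own statement) =====
-- stated objective: alternative
-- what changed: B builds a per-dataset frequency table once, computes the whole list of weighted counts (over distinct values only) for the candidate key lengths, and picks the answer as lengths[counts.index(max(counts))], replacing A's nested rescans with a running (max,k) accumulator; the empty range is answered up front.
import Mathlib
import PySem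

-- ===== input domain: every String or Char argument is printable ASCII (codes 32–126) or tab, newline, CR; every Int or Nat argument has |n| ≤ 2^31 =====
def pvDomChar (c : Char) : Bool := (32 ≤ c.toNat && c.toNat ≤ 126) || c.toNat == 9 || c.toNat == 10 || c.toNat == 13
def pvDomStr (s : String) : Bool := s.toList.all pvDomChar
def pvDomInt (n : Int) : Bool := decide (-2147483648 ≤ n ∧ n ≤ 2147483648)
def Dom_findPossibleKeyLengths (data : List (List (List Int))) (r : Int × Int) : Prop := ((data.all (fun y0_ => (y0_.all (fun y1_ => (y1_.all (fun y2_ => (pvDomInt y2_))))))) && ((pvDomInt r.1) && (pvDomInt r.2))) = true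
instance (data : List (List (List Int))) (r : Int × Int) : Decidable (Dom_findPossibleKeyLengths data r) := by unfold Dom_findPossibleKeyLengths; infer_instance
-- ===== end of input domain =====

-- B builds each dataset's frequency table once, computes the list of weighted counts per
-- candidate key length, and picks lengths[counts.index(max(counts))] (alternative decomposition).


-- ===== PORT A =====
-- res = [int]*len(data); for d in range(len(data)): … res[d] = k  → one output per dataset, in order.
-- t[0] is ported as pyGetD t 0 0 (the IndexError case t = [] is excluded by Pre_), and
-- % as PySem.Int.mod (the ZeroDivisionError case, 0 in range with a nonempty dataset, is excluded by Pre_).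
def findPossibleKeyLengths (data : List (List (List Int))) (r : Int × Int) : List Int :=
  data.map (fun d =>
    ((PySem.List.pyRange r.1 (r.2 + 1) 1).foldl
      (fun (mk : Int × Int) i =>
        let c := d.foldl (fun c t =>
          if PySem.Int.mod (PySem.List.pyGetD t 0 0) i = 0 then c + 1 else c) 0
        if c > mk.1 then (c, i) else mk)
      (-1, 0)).2)

-- ===== PORT B =====
-- lengths = list(range(r[0], r[1]+1)); per dataset: frequency dict, list of weighted counts,
-- answer = lengths[counts.index(max(counts))]; the j from list.index is nonnegative and in
-- range, so lengths[j] is ported as lengths.getD j 0.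
def findPossibleKeyLengths_alt (data : List (List (List Int))) (r : Int × Int) : List Int :=
  let lengths := PySem.List.pyRange r.1 (r.2 + 1) 1
  if lengths = [] then data.map (fun _ => (0 : Int)) else
  data.map (fun d =>
    let freq := d.foldl (fun fr t =>
      let v := PySem.List.pyGetD t 0 0
      fr.insert v (fr.getD v 0 + 1)) (PySem.Dict.empty : PySem.Dict Int Int)
    let counts := lengths.map (fun i =>
      ((freq.items.filter (fun p => PySem.Int.mod p.1 i == 0)).map Prod.snd).sum)
    match PySem.List.max? counts (fun y => y) with
    | none => 0
    | some m =>
      match PySem.List.index? counts m with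
      | none => 0
      | some j => lengths.getD j 0)

-- ===== PRECONDITION & SPEC =====
-- Pre_ is exactly where the Python A returns: if the key-length range is nonempty, every
-- row t must be nonempty (else t[0] raises IndexError) and, if 0 lies in the range, every
-- dataset must be empty (else v % 0 raises ZeroDivisionError).
def Pre_findPossibleKeyLengths (data : List (List (List Int))) (r : Int × Int) : Prop :=
  r.1 ≤ r.2 → ((∀ d ∈ data, ∀ t ∈ d, t ≠ []) ∧ ((r.1 ≤ 0 ∧ 0 ≤ r.2) → ∀ d ∈ data, d = []))
instance (data : List (List (List Int))) (r : Int × Int) : Decidable (Pre_findPossibleKeyLengths data r) := by unfold Pre_findPossibleKeyLengths; infer_instance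

def pvWitness_findPossibleKeyLengths : List (List (List Int)) × (Int × Int) :=
  ([[[4], [6]], [[9]]], (2, 3))

def Spec_findPossibleKeyLengths (data : List (List (List Int))) (r : Int × Int) (out : List Int) : Prop := out = findPossibleKeyLengths_alt data r
instance (data : List (List (List Int))) (r : Int × Int) (out : List Int) : Decidable (Spec_findPossibleKeyLengths data r out) := by unfold Spec_findPossibleKeyLengths; infer_instance

-- ===== CLAIM =====
def Claim_equal_findPossibleKeyLengths : Prop := ∀ (data : List (List (List Int))) (r : Int × Int), Dom_findPossibleKeyLengths data r → Pre_findPossibleKeyLengths data r → Spec_findPossibleKeyLengths data r (findPossibleKeyLengths data r)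

-- ===== LEMMAS AND PROOFS =====

-- a conditional-accumulate foldl is a sum of guarded contributions
theorem pv_foldl_if_add {α : Type} (p : α → Prop) [DecidablePred p] (f : α → Int) (l : List α) (c : Int) :
    l.foldl (fun c x => if p x then c + f x else c) c
      = c + (l.map (fun x => if p x then f x else 0)).sum := by
  induction l generalizing c with
  | nil => simp
  | cons x xs ih =>
    simp only [List.foldl_cons, List.map_cons, List.sum_cons, ih]
    by_cases h : p x
    · simp [h]; ring
    · simp [h]

-- summing an indicator pinned to one element of a Nodup list
theorem pv_sum_indicator (S : List Int) (hS : S.Nodup) (v : Int) (hv : v ∈ S) (c : Int) :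
    (S.map (fun k => if k = v then c else 0)).sum = c := by
  induction S with
  | nil => cases hv
  | cons a S ih =>
    by_cases hav : a = v
    · have hvn : v ∉ S := by
        have := (List.nodup_cons.mp hS).1; rwa [hav] at this
      have hz : (S.map (fun k => if k = v then c else 0)).sum = 0 := by
        apply List.sum_eq_zero
        intro x hx
        rcases List.mem_map.mp hx with ⟨k, hk, rfl⟩
        have : k ≠ v := fun e => hvn (e ▸ hk)
        simp [this]
      simp [hav, hz]
    · have hvS : v ∈ S := by
        rcases List.mem_cons.mp hv with h | h
        · exact absurd h.symm hav
        · exact h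
      simp [hav, ih (List.nodup_cons.mp hS).2 hvS]

-- summing guarded multiplicities over a Nodup superset of the values equals the plain
-- guarded count over the values themselves
theorem pv_sum_count (p : Int → Prop) [DecidablePred p] (vals S : List Int)
    (hS : S.Nodup) (hmem : ∀ v ∈ vals, v ∈ S) :
    (S.map (fun k => if p k then (vals.count k : Int) else 0)).sum
      = (vals.map (fun v => if p v then (1 : Int) else 0)).sum := by
  induction vals with
  | nil => simp
  | cons v vs ih =>
    have hv : v ∈ S := hmem v (List.mem_cons_self ..)
    have hstep :
        (S.map (fun k => if p k then ((v :: vs).count k : Int) else 0))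
          = S.map (fun k =>
              (if p k then (vs.count k : Int) else 0) +
              (if k = v then (if p v then (1 : Int) else 0) else 0)) := by
      apply List.map_congr_left
      intro k _
      by_cases hkv : k = v
      · subst hkv
        by_cases hp : p k
        · simp [hp, List.count_cons_self]
        · simp [hp]
      · have hc : (v :: vs).count k = vs.count k := by
          simp [List.count_cons]
          intro e; exact absurd e.symm hkv
        by_cases hp : p k <;> simp [hp, hc, hkv]
    rw [hstep, PySem.List.sum_map_add_int,
        ih (fun w hw => hmem w (List.mem_cons_of_mem _ hw)),
        pv_sum_indicator S hS v hv]
    exact add_comm _ _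

-- summing a projection of a filtered list is summing the guarded projection
theorem pv_filter_map_sum {α : Type} (q : α → Bool) (f : α → Int) (l : List α) :
    ((l.filter q).map f).sum = (l.map (fun x => if q x then f x else 0)).sum := by
  induction l with
  | nil => rfl
  | cons x xs ih =>
    by_cases h : q x = true
    · simp [h, ih]
    · simp [h, ih]

-- the per-key-length count of A (element scan) equals B's (weighted scan of the counter)
theorem pv_counts_eq (vals : List Int) (i : Int) :
    vals.foldl (fun c v => if PySem.Int.mod v i = 0 then c + 1 else c) 0
      = (((PySem.Dict.counter vals).items.filter
            (fun p => PySem.Int.mod p.1 i == 0)).map Prod.snd).sum := by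
  rw [pv_filter_map_sum, PySem.Dict.items_counter, List.map_map,
      pv_foldl_if_add (fun v => PySem.Int.mod v i = 0) (fun _ => (1 : Int)) vals 0]
  have hfe : ((fun p : Int × Int => if (PySem.Int.mod p.1 i == 0) = true then p.2 else 0) ∘
        fun k => (k, (vals.count k : Int)))
      = fun k => if PySem.Int.mod k i = 0 then (vals.count k : Int) else 0 := by
    funext k
    by_cases h : PySem.Int.mod k i = 0 <;> simp [h]
  rw [hfe,
      pv_sum_count _ vals (PySem.Set.ofList vals)
        (PySem.Set.nodup_ofList vals) (fun v hv => (PySem.Set.mem_ofList vals v).mpr hv)]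
  simp

-- no element beats the running max: the (max, k) fold is constant
theorem pv_fold_no_update (f : Int → Int) (l : List Int) (m k : Int)
    (h : ∀ x ∈ l, f x ≤ m) :
    l.foldl (fun (mk : Int × Int) i => if f i > mk.1 then (f i, i) else mk) (m, k) = (m, k) := by
  induction l with
  | nil => rfl
  | cons x xs ih =>
    have hx : ¬ f x > m := not_lt.mpr (h x (List.mem_cons_self ..))
    simp only [List.foldl_cons, if_neg hx]
    exact ih (fun y hy => h y (List.mem_cons_of_mem _ hy))

-- the first component of the fold is the running max
theorem pv_fold_fst (f : Int → Int) (l : List Int) (m k : Int) :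
    (l.foldl (fun (mk : Int × Int) i => if f i > mk.1 then (f i, i) else mk) (m, k)).1
      = (l.map f).foldl max m := by
  induction l generalizing m k with
  | nil => rfl
  | cons x xs ih =>
    by_cases h : f x > m
    · simp only [List.foldl_cons, if_pos h, List.map_cons, max_eq_right (le_of_lt h), ih]
    · simp only [List.foldl_cons, if_neg h, List.map_cons, max_eq_left (not_lt.mp h), ih]

-- the second component is the FIRST element attaining the running max (once something beats m)
theorem pv_fold_snd (f : Int → Int) (l : List Int) (m k : Int)
    (h : ∃ x ∈ l, m < f x) :
    ∃ pre suf,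
      l = pre ++ (l.foldl (fun (mk : Int × Int) i => if f i > mk.1 then (f i, i) else mk) (m, k)).2 :: suf ∧
      f (l.foldl (fun (mk : Int × Int) i => if f i > mk.1 then (f i, i) else mk) (m, k)).2
        = (l.foldl (fun (mk : Int × Int) i => if f i > mk.1 then (f i, i) else mk) (m, k)).1 ∧
      ∀ y ∈ pre, f y < (l.foldl (fun (mk : Int × Int) i => if f i > mk.1 then (f i, i) else mk) (m, k)).1 := by
  induction l generalizing m k with
  | nil => rcases h with ⟨x, hx, _⟩; cases hx
  | cons i t ih =>
    by_cases hi : f i > m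
    · simp only [List.foldl_cons, if_pos hi]
      by_cases hall : ∀ x ∈ t, f x ≤ f i
      · rw [pv_fold_no_update f t (f i) i hall]
        exact ⟨[], t, rfl, rfl, by simp⟩
      · simp only [not_forall, not_le] at hall
        obtain ⟨x0, hx0, hix0⟩ := hall
        rcases ih (f i) i ⟨x0, hx0, hix0⟩ with ⟨pre, suf, hsplit, hfeq, hlt⟩
        refine ⟨i :: pre, suf, by rw [List.cons_append, ← hsplit], hfeq, ?_⟩
        intro y hy
        rcases List.mem_cons.mp hy with rfl | hy'
        · calc f y < f x0 := hix0
            _ ≤ (t.map f).foldl max (f y) :=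
              (PySem.List.le_foldl_max (t.map f) (f y)).2 (f x0) (List.mem_map_of_mem hx0)
            _ = _ := (pv_fold_fst f t (f y) y).symm
        · exact hlt y hy'
    · simp only [List.foldl_cons, if_neg hi]
      have hile : f i ≤ m := not_lt.mp hi
      have ht : ∃ x ∈ t, m < f x := by
        rcases h with ⟨x, hx, hmx⟩
        rcases List.mem_cons.mp hx with rfl | hx'
        · exact absurd hmx hi
        · exact ⟨x, hx', hmx⟩
      rcases ih m k ht with ⟨pre, suf, hsplit, hfeq, hlt⟩
      refine ⟨i :: pre, suf, by rw [List.cons_append, ← hsplit], hfeq, ?_⟩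
      intro y hy
      rcases List.mem_cons.mp hy with rfl | hy'
      · rcases ht with ⟨x, hx, hmx⟩
        calc f y ≤ m := hile
          _ < f x := hmx
          _ ≤ (t.map f).foldl max m :=
            (PySem.List.le_foldl_max (t.map f) m).2 (f x) (List.mem_map_of_mem hx)
          _ = _ := (pv_fold_fst f t m k).symm
      · exact hlt y hy'

-- indexing the split list at the prefix length yields the pivot
theorem pv_getD_append (pre suf : List Int) (a d : Int) :
    (pre ++ a :: suf).getD pre.length d = a := by
  induction pre with
  | nil => rfl
  | cons x xs ih => exact ih

-- A's running-(max,k) loop computes lengths[counts.index(max(counts))]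
theorem pv_pick (f : Int → Int) (l : List Int) (hl : l ≠ []) (hpos : ∀ x ∈ l, 0 ≤ f x) :
    (l.foldl (fun (mk : Int × Int) i => if f i > mk.1 then (f i, i) else mk) ((-1 : Int), (0 : Int))).2
      = (match PySem.List.max? (l.map f) (fun y => y) with
         | none => (0 : Int)
         | some m =>
           match PySem.List.index? (l.map f) m with
           | none => (0 : Int)
           | some j => l.getD j 0) := by
  rcases l with _ | ⟨x, t⟩
  · exact absurd rfl hl
  · have hex : ∃ y ∈ x :: t, (-1 : Int) < f y :=
      ⟨x, List.mem_cons_self .., lt_of_lt_of_le (by norm_num) (hpos x (List.mem_cons_self ..))⟩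
    have hfst := pv_fold_fst f (x :: t) (-1) 0
    rcases pv_fold_snd f (x :: t) (-1) 0 hex with ⟨pre, suf, hsplit, hfeq, hlt⟩
    have hmax : PySem.List.max? ((x :: t).map f) (fun y => y)
        = some ((x :: t).foldl (fun (mk : Int × Int) i => if f i > mk.1 then (f i, i) else mk) ((-1 : Int), (0 : Int))).1 := by
      rw [List.map_cons, PySem.List.max?_id_cons, hfst]
      have : max (-1 : Int) (f x) = f x :=
        max_eq_right (le_trans (by norm_num) (hpos x (List.mem_cons_self ..)))
      simp [List.map_cons, this]
    set res := (x :: t).foldl (fun (mk : Int × Int) i => if f i > mk.1 then (f i, i) else mk) ((-1 : Int), (0 : Int)) with hres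
    have hmem : ((x :: t).map f) = pre.map f ++ res.1 :: suf.map f := by
      rw [hsplit, List.map_append, List.map_cons, hfeq]
    have hidx : PySem.List.index? ((x :: t).map f) res.1 = some pre.length := by
      apply (PySem.List.index?_eq_some_iff _ _ _).mpr
      refine ⟨pre.map f, suf.map f, hmem, List.length_map .., ?_⟩
      intro hm
      rcases List.mem_map.mp hm with ⟨y, hy, hyeq⟩
      exact absurd hyeq (ne_of_lt (hlt y hy))
    simp only [hmax, hidx]
    rw [hsplit, pv_getD_append]

-- ===== VERDICT =====
theorem findPossibleKeyLengths_spec : Claim_equal_findPossibleKeyLengths := by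
  intro data r _ _
  unfold Spec_findPossibleKeyLengths findPossibleKeyLengths findPossibleKeyLengths_alt
  by_cases hL : PySem.List.pyRange r.1 (r.2 + 1) 1 = []
  · simp only [hL, if_pos]
    simp
  · simp only [if_neg hL]
    apply List.map_congr_left
    intro d _
    have hfreq : d.foldl (fun fr t =>
        fr.insert (PySem.List.pyGetD t 0 0) (fr.getD (PySem.List.pyGetD t 0 0) 0 + 1)) (PySem.Dict.empty : PySem.Dict Int Int)
        = PySem.Dict.counter (d.map (fun t => PySem.List.pyGetD t 0 0)) := by
      rw [← PySem.Dict.foldl_insert_getD_add_one_eq_counter, List.foldl_map]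
    have hcnt : ∀ i : Int,
        (((d.foldl (fun fr t =>
            fr.insert (PySem.List.pyGetD t 0 0) (fr.getD (PySem.List.pyGetD t 0 0) 0 + 1)) (PySem.Dict.empty : PySem.Dict Int Int)).items.filter
              (fun p => PySem.Int.mod p.1 i == 0)).map Prod.snd).sum
        = d.foldl (fun c t =>
            if PySem.Int.mod (PySem.List.pyGetD t 0 0) i = 0 then c + 1 else c) 0 := by
      intro i
      rw [hfreq, ← pv_counts_eq, List.foldl_map]
    have hpos : ∀ i : Int, (0 : Int) ≤ d.foldl (fun c t =>
        if PySem.Int.mod (PySem.List.pyGetD t 0 0) i = 0 then c + 1 else c) 0 := by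
      intro i
      rw [pv_foldl_if_add (fun t => PySem.Int.mod (PySem.List.pyGetD t 0 0) i = 0) (fun _ => (1 : Int)) d 0]
      have : ∀ x ∈ d.map (fun t => if PySem.Int.mod (PySem.List.pyGetD t 0 0) i = 0 then (1 : Int) else 0), 0 ≤ x := by
        intro x hx
        rcases List.mem_map.mp hx with ⟨t, _, rfl⟩
        split <;> norm_num
      have := List.sum_nonneg this
      omega
    have hmapc : (PySem.List.pyRange r.1 (r.2 + 1) 1).map (fun i =>
        (((d.foldl (fun fr t =>
            fr.insert (PySem.List.pyGetD t 0 0) (fr.getD (PySem.List.pyGetD t 0 0) 0 + 1)) (PySem.Dict.empty : PySem.Dict Int Int)).items.filter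
              (fun p => PySem.Int.mod p.1 i == 0)).map Prod.snd).sum)
        = (PySem.List.pyRange r.1 (r.2 + 1) 1).map (fun i =>
            d.foldl (fun c t =>
              if PySem.Int.mod (PySem.List.pyGetD t 0 0) i = 0 then c + 1 else c) 0) := by
      exact List.map_congr_left (fun i _ => hcnt i)
    simp only [hmapc]
    exact pv_pick _ (PySem.List.pyRange r.1 (r.2 + 1) 1) hL (fun i _ => hpos i)
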